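-- pv_equiv track=rewrite | github.com/mamatkasym/algorithms-in-python | dp/examples/largest_zero_submatrix.py | solve
-- ===== SOURCE A (Python) =====
-- from typing import List
--
-- def solve(matrix: List[List]) -> int:
--     """
--     :param matrix: two dimensional binary array
--     :return: area of the largest 0 submatrix
--     """
--     n = len(matrix)
--     m = len(matrix[0])
--
--     # d[i][j] if the largest row number ( from 0 to i-1 ), in which there is an element equal to 1 in the j's column
--     d = [-1] * m
--     left = [0] * m
--     right = [0] * m
--     stack = []
--     ans = 0
--     for i in range(n):
--         for j in range(m):
--             if matrix[i][j] == 1: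
--                 d[j] = i
--
--         for j in range(m):
--             while stack and d[stack[-1]] <= d[j]:
--                 stack.pop()
--
--             left[j] = stack[-1] if stack else -1
--             stack.append(j)
--
--         while stack:
--             stack.pop()
--
--         for j in range(m - 1, -1, -1):
--             while stack and d[stack[-1]] <= d[j]:
--                 stack.pop()
--
--             right[j] = stack[-1] if stack else m
--             stack.append(j)
--
--         while stack:
--             stack.pop()
--
--         for j in range(m):
--             ans = max(ans, (i - d[j]) * (right[j] - left[j] - 1))
--     return ans
-- ===== SOURCE B (Python) =====
-- def solve(matrix):
--     m = len(matrix[0])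
--     h = [0] * m
--     ans = 0
--     for row in matrix:
--         h = [0 if row[j] == 1 else h[j] + 1 for j in range(m)]
--         for j in range(m):
--             L = j
--             while L > 0 and h[L - 1] >= h[j]:
--                 L -= 1
--             R = j
--             while R < m - 1 and h[R + 1] >= h[j]:
--                 R += 1
--             ans = max(ans, h[j] * (R - L + 1))
--     return ans
-- ===== Notes on version B (the rewrite author's own statement) =====
-- stated objective: simpler
-- what changed: Replaces A's per-row monotonic-stack left/right boundary passes over the last-one-row array d with a per-column heights (histogram) array and, for each bar, direct left/right while-loop scans over neighbouring bars that are at least as tall; no stack and no d/left/right arrays.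
import Mathlib
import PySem

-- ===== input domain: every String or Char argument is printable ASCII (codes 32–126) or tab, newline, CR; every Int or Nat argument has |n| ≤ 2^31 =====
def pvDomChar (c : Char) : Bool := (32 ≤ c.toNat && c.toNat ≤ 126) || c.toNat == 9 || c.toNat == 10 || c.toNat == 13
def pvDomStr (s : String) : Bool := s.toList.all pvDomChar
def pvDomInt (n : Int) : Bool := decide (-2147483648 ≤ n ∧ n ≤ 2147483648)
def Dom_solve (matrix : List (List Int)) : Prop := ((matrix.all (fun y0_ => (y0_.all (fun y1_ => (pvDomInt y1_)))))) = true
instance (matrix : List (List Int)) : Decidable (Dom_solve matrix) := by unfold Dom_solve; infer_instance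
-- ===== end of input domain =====

-- B replaces A's per-row monotonic-stack left/right boundary passes over the last-one-row
-- array d with a per-column heights array and, for each bar, direct left/right scans while
-- neighbouring bars are at least as tall (objective: simpler — no stack, no d/left/right arrays).

-- ===== PORT A =====

-- left-boundary pass: for j in range(m): pop while d[stack[-1]] <= d[j]; left[j] = top or -1; push j
def leftGo (d : List Int) : List Nat → List Nat → List Int
  | [], _ => []
  | j :: rest, st =>
      let st' := st.dropWhile (fun k => decide (d.getD k 0 ≤ d.getD j 0))
      (match st' with | [] => (-1 : Int) | k :: _ => (k : Int)) :: leftGo d rest (j :: st')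

-- right-boundary pass: for j in range(m-1,-1,-1): pop likewise; right[j] = top or m; push j
-- (produces the values in processing order, i.e. for j = m-1 down to 0)
def rightGo (d : List Int) (m : Nat) : List Nat → List Nat → List Int
  | [], _ => []
  | j :: rest, st =>
      let st' := st.dropWhile (fun k => decide (d.getD k 0 ≤ d.getD j 0))
      (match st' with | [] => (m : Int) | k :: _ => (k : Int)) :: rightGo d m rest (j :: st')

-- final pass of each row: ans = max(ans, (i - d[j]) * (right[j] - left[j] - 1))
def ansGo (i : Int) (d left right : List Int) : List Nat → Int → Int
  | [], ans => ans
  | j :: rest, ans =>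
      ansGo i d left right rest
        (max ans ((i - d.getD j 0) * (right.getD j 0 - left.getD j 0 - 1)))

-- for i in range(n): update d from row i, run the three passes
def rowGo : List (List Int) → Int → Nat → List Int → Int → Int
  | [], _, _, _, ans => ans
  | row :: rest, i, m, d, ans =>
      let d' := List.zipWith (fun dj rj => if rj = 1 then i else dj) d row
      let left := leftGo d' (List.range m) []
      let right := (rightGo d' m ((List.range m).reverse) []).reverse
      rowGo rest (i + 1) m d' (ansGo i d' left right (List.range m) ans)

def solve (matrix : List (List Int)) : Int :=
  rowGo matrix 0 (matrix.headD []).length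
    (List.replicate (matrix.headD []).length (-1)) 0

-- ===== PORT B =====

-- while L > 0 and h[L-1] >= h[j]: L -= 1
def scanL (h : List Int) (hj : Int) : Nat → Nat
  | 0 => 0
  | L + 1 => if hj ≤ h.getD L 0 then scanL h hj L else L + 1

-- while R < m-1 and h[R+1] >= h[j]: R += 1
def scanR (h : List Int) (m : Nat) (hj : Int) (R : Nat) : Nat :=
  if _h : R + 1 < m then
    if hj ≤ h.getD (R + 1) 0 then scanR h m hj (R + 1) else R
  else R
termination_by m - R

-- for j in range(m): ans = max(ans, h[j] * (R - L + 1))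
def areaGo (h : List Int) (m : Nat) : List Nat → Int → Int
  | [], ans => ans
  | j :: rest, ans =>
      let hj := h.getD j 0
      areaGo h m rest (max ans (hj * ((scanR h m hj j : Int) - (scanL h hj j : Int) + 1)))

-- for row in matrix: rebuild heights, then the area pass
def rowGoB : List (List Int) → Nat → List Int → Int → Int
  | [], _, _, ans => ans
  | row :: rest, m, h, ans =>
      let h' := List.zipWith (fun hj rj => if rj = 1 then (0 : Int) else hj + 1) h row
      rowGoB rest m h' (areaGo h' m (List.range m) ans)

def solve_alt (matrix : List (List Int)) : Int :=
  rowGoB matrix (matrix.headD []).length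
    (List.replicate (matrix.headD []).length 0) 0

-- ===== PRECONDITION & SPEC =====
-- Pre_ excludes exactly the inputs where the Pythons raise IndexError: the empty matrix
-- (A computes len(matrix[0]), B likewise) and matrices with a row shorter than the first row
-- (both index matrix[i][j] for j < len(matrix[0])).
def Pre_solve (matrix : List (List Int)) : Prop :=
  matrix ≠ [] ∧ ∀ row ∈ matrix, (matrix.headD []).length ≤ row.length
instance (matrix : List (List Int)) : Decidable (Pre_solve matrix) := by
  unfold Pre_solve; infer_instance

def pvWitness_solve : List (List Int) := [[0, 1, 0], [0, 0, 0]]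

def Spec_solve (matrix : List (List Int)) (out : Int) : Prop := out = solve_alt matrix
instance (matrix : List (List Int)) (out : Int) : Decidable (Spec_solve matrix out) := by
  unfold Spec_solve; infer_instance

-- ===== CLAIM (what is proved, stated in full; the proofs are below) =====
def Claim_equal_solve : Prop :=
  ∀ (matrix : List (List Int)), Dom_solve matrix → Pre_solve matrix →
    Spec_solve matrix (solve matrix)

-- ===== LEMMAS AND PROOFS =====

-- dropping with a weaker predicate after a stronger one is dropping with the weaker one
theorem dropWhile_dropWhile {α : Type} (p q : α → Bool)
    (h : ∀ a, q a = true → p a = true) :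
    ∀ l : List α, (l.dropWhile q).dropWhile p = l.dropWhile p := by
  intro l
  induction l with
  | nil => rfl
  | cons a t ih =>
      by_cases hq : q a = true
      · rw [List.dropWhile_cons_of_pos hq, ih, List.dropWhile_cons_of_pos (h a hq)]
      · rw [List.dropWhile_cons_of_neg hq]

-- the stack of A's left pass just before index j is processed
def stackSpec (d : List Int) : Nat → List Nat
  | 0 => []
  | j + 1 => j :: (stackSpec d j).dropWhile (fun k => decide (d.getD k 0 ≤ d.getD j 0))

-- the top of the popped stack is the nearest index to the left with a strictly larger d
theorem stackSpec_head (d : List Int) :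
    ∀ (j : Nat) (x : Int),
      ((stackSpec d j).dropWhile (fun k => decide (d.getD k 0 ≤ x))).head?
        = (List.range j).reverse.find? (fun k => decide (x < d.getD k 0)) := by
  intro j
  induction j with
  | zero => intro x; simp [stackSpec]
  | succ j ih =>
      intro x
      rw [List.range_succ]
      by_cases hle : d.getD j 0 ≤ x
      · have hdrop :
            ((stackSpec d (j + 1)).dropWhile (fun k => decide (d.getD k 0 ≤ x)))
              = (stackSpec d j).dropWhile (fun k => decide (d.getD k 0 ≤ x)) := by
          show ((j :: (stackSpec d j).dropWhile
              (fun k => decide (d.getD k 0 ≤ d.getD j 0))).dropWhile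
              (fun k => decide (d.getD k 0 ≤ x))) = _
          rw [List.dropWhile_cons_of_pos (by simpa using hle)]
          exact dropWhile_dropWhile _ _
            (fun a ha => by
              simp only [decide_eq_true_eq] at *
              exact le_trans ha hle) _
        rw [hdrop, ih x, List.reverse_append, List.reverse_singleton,
          List.singleton_append, List.find?_cons_of_neg (by simpa using not_lt.mpr hle)]
      · have hx : x < d.getD j 0 := lt_of_not_ge hle
        have : ((stackSpec d (j + 1)).dropWhile (fun k => decide (d.getD k 0 ≤ x)))
            = j :: (stackSpec d j).dropWhile (fun k => decide (d.getD k 0 ≤ d.getD j 0)) := by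
          show ((j :: _).dropWhile _) = _
          rw [List.dropWhile_cons_of_neg (by simpa using hle)]
        rw [this, List.reverse_append, List.reverse_singleton, List.singleton_append,
          List.find?_cons_of_pos (by simpa using hx), List.head?_cons]

-- left-boundary value at index t
def leftVal (d : List Int) (t : Nat) : Int :=
  match (List.range t).reverse.find? (fun k => decide (d.getD t 0 < d.getD k 0)) with
  | none => -1
  | some k => (k : Int)

-- right-boundary value at index t (m = number of columns)
def rightVal (d : List Int) (m : Nat) (t : Nat) : Int :=
  match (List.range' (t + 1) (m - 1 - t)).find? (fun k => decide (d.getD t 0 < d.getD k 0)) with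
  | none => (m : Int)
  | some k => (k : Int)

theorem leftGo_eq (d : List Int) :
    ∀ (c j : Nat),
      leftGo d (List.range' j c) (stackSpec d j)
        = (List.range' j c).map (leftVal d) := by
  intro c
  induction c with
  | zero => intro j; simp [leftGo]
  | succ c ih =>
      intro j
      rw [List.range'_succ]
      show (match ((stackSpec d j).dropWhile
            (fun k => decide (d.getD k 0 ≤ d.getD j 0))) with
          | [] => (-1 : Int) | k :: _ => (k : Int))
          :: leftGo d (List.range' (j + 1) c)
              (j :: (stackSpec d j).dropWhile (fun k => decide (d.getD k 0 ≤ d.getD j 0)))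
        = _
      have hstep : (j :: (stackSpec d j).dropWhile
          (fun k => decide (d.getD k 0 ≤ d.getD j 0))) = stackSpec d (j + 1) := rfl
      rw [hstep, ih (j + 1), List.map_cons]
      congr 1
      unfold leftVal
      rw [← stackSpec_head d j (d.getD j 0)]
      rcases hh : ((stackSpec d j).dropWhile (fun k => decide (d.getD k 0 ≤ d.getD j 0))) with
        _ | ⟨k, tl⟩ <;> rfl

-- the stack of A's right pass just before index (m - 1 - c) is processed
-- (c indices already processed, from m-1 down)
def stackSpecR (d : List Int) (m : Nat) : Nat → List Nat
  | 0 => []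
  | c + 1 => (m - 1 - c) ::
      (stackSpecR d m c).dropWhile (fun k => decide (d.getD k 0 ≤ d.getD (m - 1 - c) 0))

theorem stackSpecR_head (d : List Int) (m : Nat) :
    ∀ (c : Nat), c ≤ m → ∀ (x : Int),
      ((stackSpecR d m c).dropWhile (fun k => decide (d.getD k 0 ≤ x))).head?
        = (List.range' (m - c) c).find? (fun k => decide (x < d.getD k 0)) := by
  intro c
  induction c with
  | zero => intro _ x; simp [stackSpecR]
  | succ c ih =>
      intro hc x
      have ht : m - 1 - c = m - (c + 1) := by omega
      have hrange : List.range' (m - (c + 1)) (c + 1)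
          = (m - (c + 1)) :: List.range' (m - c) c := by
        have h1 : m - c = (m - (c + 1)) + 1 := by omega
        rw [List.range'_succ, ← h1]
      by_cases hle : d.getD (m - 1 - c) 0 ≤ x
      · have hdrop :
            ((stackSpecR d m (c + 1)).dropWhile (fun k => decide (d.getD k 0 ≤ x)))
              = (stackSpecR d m c).dropWhile (fun k => decide (d.getD k 0 ≤ x)) := by
          show (((m - 1 - c) :: (stackSpecR d m c).dropWhile _).dropWhile _) = _
          rw [List.dropWhile_cons_of_pos (by simpa using hle)]
          exact dropWhile_dropWhile _ _
            (fun a ha => by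
              simp only [decide_eq_true_eq] at *
              exact le_trans ha hle) _
        rw [hdrop, ih (by omega) x, hrange, ← ht,
          List.find?_cons_of_neg (by simpa using not_lt.mpr hle)]
      · have : ((stackSpecR d m (c + 1)).dropWhile (fun k => decide (d.getD k 0 ≤ x)))
            = (m - 1 - c) :: (stackSpecR d m c).dropWhile
                (fun k => decide (d.getD k 0 ≤ d.getD (m - 1 - c) 0)) := by
          show (((m - 1 - c) :: _).dropWhile _) = _
          rw [List.dropWhile_cons_of_neg (by simpa using hle)]
        rw [this, hrange, ← ht, List.head?_cons,
          List.find?_cons_of_pos (by simpa using not_le.mp hle)]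

theorem rightGo_eq (d : List Int) (m : Nat) :
    ∀ (t : Nat), t ≤ m →
      rightGo d m ((List.range t).reverse) (stackSpecR d m (m - t))
        = ((List.range t).reverse).map (rightVal d m) := by
  intro t
  induction t with
  | zero => intro _; simp [rightGo]
  | succ t ih =>
      intro ht
      rw [List.range_succ, List.reverse_append, List.reverse_singleton, List.singleton_append]
      show (match ((stackSpecR d m (m - (t + 1))).dropWhile
            (fun k => decide (d.getD k 0 ≤ d.getD t 0))) with
          | [] => (m : Int) | k :: _ => (k : Int))
          :: rightGo d m ((List.range t).reverse)
              (t :: (stackSpecR d m (m - (t + 1))).dropWhile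
                (fun k => decide (d.getD k 0 ≤ d.getD t 0)))
        = _
      have hc : m - t = (m - (t + 1)) + 1 := by omega
      have hidx : m - 1 - (m - (t + 1)) = t := by omega
      have hstep : (t :: (stackSpecR d m (m - (t + 1))).dropWhile
            (fun k => decide (d.getD k 0 ≤ d.getD t 0)))
          = stackSpecR d m (m - t) := by
        rw [hc]
        show _ = (m - 1 - (m - (t + 1))) :: _
        rw [hidx]
      rw [hstep, ih (by omega), List.map_cons]
      congr 1
      have hhead := stackSpecR_head d m (m - (t + 1)) (by omega) (d.getD t 0)
      have h1 : m - (m - (t + 1)) = t + 1 := by omega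
      have h2 : m - 1 - t = m - (t + 1) := by omega
      rw [h1] at hhead
      unfold rightVal
      rw [h2, ← hhead]
      rcases hh : ((stackSpecR d m (m - (t + 1))).dropWhile
          (fun k => decide (d.getD k 0 ≤ d.getD t 0))) with _ | ⟨k, tl⟩ <;> rfl

-- getD of a range-map at an in-range index
theorem getD_map_range (f : Nat → Int) (m j : Nat) (hj : j < m) :
    ((List.range m).map f).getD j 0 = f j := by
  rw [List.getD_eq_getElem?_getD]
  rw [List.getElem?_map]
  simp [hj]

-- B's left scan finds the same boundary
theorem scanL_eq (h : List Int) (hj : Int) :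
    ∀ j : Nat,
      scanL h hj j
        = (match (List.range j).reverse.find? (fun k => decide (h.getD k 0 < hj)) with
            | none => 0
            | some k => k + 1) := by
  intro j
  induction j with
  | zero => simp [scanL]
  | succ j ih =>
      rw [List.range_succ, List.reverse_append, List.reverse_singleton, List.singleton_append]
      by_cases hle : hj ≤ h.getD j 0
      · show (if hj ≤ h.getD j 0 then scanL h hj j else j + 1) = _
        rw [if_pos hle, ih, List.find?_cons_of_neg (by simpa using not_lt.mpr hle)]
      · show (if hj ≤ h.getD j 0 then scanL h hj j else j + 1) = _
        rw [if_neg hle, List.find?_cons_of_pos (by simpa using not_le.mp hle)]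

-- B's right scan finds the same boundary
theorem scanR_eq (h : List Int) (m : Nat) (hj : Int) :
    ∀ (c R : Nat), R < m → m - 1 - R = c →
      scanR h m hj R
        = (match (List.range' (R + 1) (m - 1 - R)).find? (fun k => decide (h.getD k 0 < hj)) with
            | none => m - 1
            | some k => k - 1) := by
  intro c
  induction c with
  | zero =>
      intro R hR hc
      have hnot : ¬ (R + 1 < m) := by omega
      rw [scanR, dif_neg hnot, hc]
      show R = m - 1
      omega
  | succ c ih =>
      intro R hR hc
      have hR1 : R + 1 < m := by omega
      have hrange : List.range' (R + 1) (m - 1 - R)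
          = (R + 1) :: List.range' (R + 2) (m - 1 - (R + 1)) := by
        have h1 : m - 1 - R = (m - 1 - (R + 1)) + 1 := by omega
        rw [h1, List.range'_succ]
      by_cases hle : hj ≤ h.getD (R + 1) 0
      · rw [scanR, dif_pos hR1, if_pos hle, ih (R + 1) hR1 (by omega), hrange,
          List.find?_cons_of_neg (by simpa using not_lt.mpr hle)]
      · rw [scanR, dif_pos hR1, if_neg hle, hrange,
          List.find?_cons_of_pos (by simpa using not_le.mp hle)]
        rfl

-- bridge: heights are i minus d, pointwise at in-range indices
theorem getD_map_sub (i : Int) (d : List Int) (k : Nat) (hk : k < d.length) :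
    (d.map (fun x => i - x)).getD k 0 = i - d.getD k 0 := by
  rw [List.getD_eq_getElem?_getD, List.getD_eq_getElem?_getD, List.getElem?_map]
  rw [List.getElem?_eq_getElem hk]
  simp

theorem find?_congr' {α : Type} (p q : α → Bool) :
    ∀ l : List α, (∀ a ∈ l, p a = q a) → l.find? p = l.find? q := by
  intro l
  induction l with
  | nil => intro _; rfl
  | cons a t ih =>
      intro hpq
      rw [List.find?_cons, List.find?_cons, hpq a (by simp)]
      split
      · rfl
      · exact ih (fun b hb => hpq b (by simp [hb]))

-- the per-index terms of A's ans pass and B's area pass agree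
theorem term_eq (i : Int) (d : List Int) (m : Nat) (hd : d.length = m)
    (j : Nat) (hj : j < m) :
    (i - d.getD j 0)
        * (((List.range m).map (rightVal d m)).getD j 0
            - ((List.range m).map (leftVal d)).getD j 0 - 1)
      = (d.map (fun x => i - x)).getD j 0
          * ((scanR (d.map (fun x => i - x)) m ((d.map (fun x => i - x)).getD j 0) j : Int)
              - (scanL (d.map (fun x => i - x)) ((d.map (fun x => i - x)).getD j 0) j : Int)
              + 1) := by
  set h := d.map (fun x => i - x) with hh
  have hhj : h.getD j 0 = i - d.getD j 0 := getD_map_sub i d j (by omega)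
  have hpred : ∀ k, k < m →
      (decide (h.getD k 0 < h.getD j 0) = decide (d.getD j 0 < d.getD k 0)) := by
    intro k hk
    have := getD_map_sub i d k (by omega)
    rw [this, hhj]
    by_cases hlt : d.getD j 0 < d.getD k 0
    · simp [hlt, show i - d.getD k 0 < i - d.getD j 0 by omega]
    · simp [hlt, show ¬ i - d.getD k 0 < i - d.getD j 0 by omega]
  have hfl : (List.range j).reverse.find? (fun k => decide (h.getD k 0 < h.getD j 0))
      = (List.range j).reverse.find? (fun k => decide (d.getD j 0 < d.getD k 0)) := by
    apply find?_congr'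
    intro a ha
    have : a < j := by simpa using List.mem_range.mp (by simpa using ha)
    exact hpred a (by omega)
  have hfr : (List.range' (j + 1) (m - 1 - j)).find?
        (fun k => decide (h.getD k 0 < h.getD j 0))
      = (List.range' (j + 1) (m - 1 - j)).find? (fun k => decide (d.getD j 0 < d.getD k 0)) := by
    apply find?_congr'
    intro a ha
    have := List.mem_range'.mp ha
    exact hpred a (by omega)
  rw [getD_map_range _ _ _ hj, getD_map_range _ _ _ hj, scanL_eq, scanR_eq h m _ (m - 1 - j) j hj rfl]
  rw [hfl, hfr, hhj]
  unfold leftVal rightVal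
  rcases hL : (List.range j).reverse.find? (fun k => decide (d.getD j 0 < d.getD k 0)) with
    _ | kL <;>
    rcases hRf : (List.range' (j + 1) (m - 1 - j)).find?
        (fun k => decide (d.getD j 0 < d.getD k 0)) with _ | kR
  · simp only
    have h1 : ((m - 1 : Nat) : Int) = (m : Int) - 1 := by omega
    rw [h1]; ring
  · have hmem := List.mem_range'.mp (List.mem_of_find?_eq_some hRf)
    have hk1 : 1 ≤ kR := by omega
    simp only
    have h1 : ((kR - 1 : Nat) : Int) = (kR : Int) - 1 := by omega
    rw [h1]; ring
  · simp only
    have h1 : ((m - 1 : Nat) : Int) = (m : Int) - 1 := by omega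
    rw [h1]
    push_cast
    ring
  · have hmem := List.mem_range'.mp (List.mem_of_find?_eq_some hRf)
    have hk1 : 1 ≤ kR := by omega
    simp only
    have h1 : ((kR - 1 : Nat) : Int) = (kR : Int) - 1 := by omega
    rw [h1]
    push_cast
    ring

-- A's ans pass equals B's area pass (indices all below m)
theorem ansGo_eq_areaGo (i : Int) (d : List Int) (m : Nat) (hd : d.length = m) :
    ∀ (js : List Nat) (ans : Int), (∀ j ∈ js, j < m) →
      ansGo i d ((List.range m).map (leftVal d)) ((List.range m).map (rightVal d m)) js ans
        = areaGo (d.map (fun x => i - x)) m js ans := by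
  intro js
  induction js with
  | nil => intro ans _; rfl
  | cons j rest ih =>
      intro ans hjs
      show ansGo i d _ _ rest _ = areaGo _ m rest _
      rw [ih _ (fun k hk => hjs k (by simp [hk]))]
      congr 1
      rw [max_comm, max_comm ans]
      congr 1
      exact term_eq i d m hd j (hjs j (by simp))

-- the zipWith height update preserves the pointwise relation h = d.map (i - ·)
theorem zip_update (i : Int) :
    ∀ (d row : List Int),
      List.zipWith (fun hj rj => if rj = 1 then (0 : Int) else hj + 1)
          (d.map (fun x => i - 1 - x)) row
        = (List.zipWith (fun dj rj => if rj = 1 then i else dj) d row).map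
            (fun x => i - x) := by
  intro d
  induction d with
  | nil => intro row; simp
  | cons a t ih =>
      intro row
      cases row with
      | nil => simp
      | cons r rs =>
          simp only [List.map_cons, List.zipWith_cons_cons, ih rs]
          congr 1
          by_cases hr : r = 1 <;> simp [hr] <;> ring

theorem rowGo_eq (m : Nat) :
    ∀ (rows : List (List Int)) (i : Int) (d : List Int) (ans : Int),
      d.length = m → (∀ row ∈ rows, m ≤ row.length) →
      rowGo rows i m d ans = rowGoB rows m (d.map (fun x => i - 1 - x)) ans := by
  intro rows
  induction rows with
  | nil => intro i d ans _ _; rfl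
  | cons row rest ih =>
      intro i d ans hd hlen
      show rowGo rest (i + 1) m
          (List.zipWith (fun dj rj => if rj = 1 then i else dj) d row) _ = rowGoB rest m _ _
      set d' := List.zipWith (fun dj rj => if rj = 1 then i else dj) d row with hd'
      have hd'len : d'.length = m := by
        rw [hd', List.length_zipWith, hd]
        have := hlen row (by simp)
        omega
      have hmap1 : (fun x => i + 1 - 1 - x) = (fun x : Int => i - x) := by
        funext x; ring
      have hzip := zip_update i d row
      rw [ih (i + 1) d' _ hd'len (fun r hr => hlen r (by simp [hr]))]
      show _ = rowGoB rest m
          (List.zipWith (fun hj rj => if rj = 1 then (0:Int) else hj + 1)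
            (d.map (fun x => i - 1 - x)) row) _
      rw [hzip, hmap1]
      congr 1
      have hL : leftGo d' (List.range m) [] = (List.range m).map (leftVal d') := by
        rw [List.range_eq_range']
        exact leftGo_eq d' m 0
      have hR : (rightGo d' m ((List.range m).reverse) []).reverse
          = (List.range m).map (rightVal d' m) := by
        have h0 : stackSpecR d' m (m - m) = [] := by rw [Nat.sub_self]; rfl
        rw [← h0, rightGo_eq d' m m (le_refl m), ← List.map_reverse, List.reverse_reverse]
      rw [hL, hR,
        ansGo_eq_areaGo i d' m hd'len (List.range m) ans (fun j hj => List.mem_range.mp hj)]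

-- ===== VERDICT (by name: the statement is the Claim_ definition above) =====
theorem solve_spec : Claim_equal_solve := by
  intro matrix _ hpre
  unfold Spec_solve solve solve_alt
  obtain ⟨hne, hlen⟩ := hpre
  set m := (matrix.headD []).length with hm
  have hrepl : (List.replicate m (0 : Int))
      = (List.replicate m (-1 : Int)).map (fun x => (0 : Int) - 1 - x) := by
    rw [List.map_replicate]
    norm_num
  rw [hrepl]
  exact rowGo_eq m matrix 0 (List.replicate m (-1)) 0 (by simp) hlen
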